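-- pv_equiv track=rewrite | github.com/ChinmayK0607/microgrid | analysis.py | _spans_from_mask
-- ===== SOURCE A (Python) =====
-- def _spans_from_mask(t, m):
--     spans = []
--     if len(t)==0: return spans
--     in_span = False; start = None
--     for i,flag in enumerate(m):
--         if flag and not in_span: in_span=True; start=t[i]
--         if not flag and in_span: in_span=False; spans.append((start, t[i]))
--     if in_span: spans.append((start, t[-1]))
--     return spans
-- ===== SOURCE B (Python) =====
-- def _spans_from_mask(t, m):
--     # run scanner: find each maximal True run and emit its span directly
--     if not t:
--         return []
--     spans = []
--     i, n = 0, len(m)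
--     while i < n:
--         if not m[i]:
--             i += 1
--             continue
--         j = i + 1
--         while j < n and m[j]:
--             j += 1
--         if j < n:
--             spans.append((t[i], t[j]))
--         else:
--             spans.append((t[i], t[-1]))
--         i = j
--     return spans
-- ===== Notes on version B (the rewrite author's own statement) =====
-- stated objective: alternative
-- what changed: Replaced A's per-element boolean state machine (in_span/start carried across every element) by a two-level run scanner that jumps to the end of each maximal True run and emits its span directly.
import Mathlib
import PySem

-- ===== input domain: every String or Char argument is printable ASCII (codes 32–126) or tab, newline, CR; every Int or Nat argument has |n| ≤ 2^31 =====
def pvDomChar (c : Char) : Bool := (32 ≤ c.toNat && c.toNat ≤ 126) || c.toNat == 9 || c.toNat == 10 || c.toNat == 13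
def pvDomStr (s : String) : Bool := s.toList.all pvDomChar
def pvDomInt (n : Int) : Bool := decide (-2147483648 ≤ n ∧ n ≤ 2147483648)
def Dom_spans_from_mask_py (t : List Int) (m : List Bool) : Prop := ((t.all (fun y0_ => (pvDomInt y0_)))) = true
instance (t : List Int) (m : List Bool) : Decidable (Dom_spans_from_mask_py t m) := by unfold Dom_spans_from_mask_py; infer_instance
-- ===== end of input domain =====

-- B replaces A's per-element boolean state machine by a run scanner that finds each
-- maximal True run and emits its span directly (objective: alternative decomposition).

-- ===== PORT A =====
-- the for-loop over enumerate(m) with state (in_span, start, spans); t[i] is ported as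
-- t.getD i 0 (inside Pre_ every such access is in range, so this is exact there).
def aLoop (t : List Int) : List Bool → Nat → Bool → Int → List (Int × Int) → Bool × Int × List (Int × Int)
  | [], _, in_span, start, spans => (in_span, start, spans)
  | flag :: rest, i, in_span, start, spans =>
    let p1 : Bool × Int := if flag = true ∧ in_span = false then (true, t.getD i 0) else (in_span, start)
    let p2 : Bool × List (Int × Int) :=
      if flag = false ∧ p1.1 = true then (false, spans ++ [(p1.2, t.getD i 0)]) else (p1.1, spans)
    aLoop t rest (i + 1) p2.1 p1.2 p2.2

def spans_from_mask_py (t : List Int) (m : List Bool) : List (Int × Int) :=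
  if t.length = 0 then []
  else
    let r := aLoop t m 0 false 0 []   -- start=None is never read before being set; ported as 0
    if r.1 then r.2.2 ++ [(r.2.1, t.getLastD 0)] else r.2.2   -- t[-1]: t is nonempty here

-- ===== PORT B =====
-- the outer while loop of Source B at absolute index i; the inner 'while j < n and m[j]' scan
-- is ported as the length of rest.takeWhile (fun b => b), so j = i + 1 + k.
def spansGo (t : List Int) : Nat → List Bool → List (Int × Int)
  | _, [] => []
  | i, false :: rest => spansGo t (i + 1) rest
  | i, true :: rest =>
    let k := (rest.takeWhile (fun b => b)).length
    if k < rest.length then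
      (t.getD i 0, t.getD (i + 1 + k) 0) :: spansGo t (i + 1 + k) (rest.drop k)
    else
      [(t.getD i 0, t.getLastD 0)]
termination_by _ m => m.length
decreasing_by
  all_goals first
    | (simp; done)
    | (simp [List.length_drop]; omega)

def spans_from_mask_py_alt (t : List Int) (m : List Bool) : List (Int × Int) :=
  if t = [] then [] else spansGo t 0 m

-- ===== PRECONDITION & SPEC =====
-- Pre_ is exactly A's return domain: Python A raises IndexError iff t ≠ [] and the mask
-- has a transition (m[i] ≠ m[i-1]) at some index i ≥ len(t), where it evaluates t[i].
def Pre_spans_from_mask_py (t : List Int) (m : List Bool) : Prop :=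
  t = [] ∨ ∀ i, i < m.length → t.length ≤ i → m.getD i false = m.getD (i - 1) false
instance (t : List Int) (m : List Bool) : Decidable (Pre_spans_from_mask_py t m) := by
  unfold Pre_spans_from_mask_py; infer_instance
def pvWitness_spans_from_mask_py : List Int × List Bool :=
  ([0, 1, 2, 3], [false, true, true, false])

def Spec_spans_from_mask_py (t : List Int) (m : List Bool) (out : List (Int × Int)) : Prop :=
  out = spans_from_mask_py_alt t m
instance (t : List Int) (m : List Bool) (out : List (Int × Int)) : Decidable (Spec_spans_from_mask_py t m out) := by
  unfold Spec_spans_from_mask_py; infer_instance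

-- ===== CLAIM (what is proved, stated in full; the proofs are below) =====
def Claim_equal_spans_from_mask_py : Prop := ∀ (t : List Int) (m : List Bool), Dom_spans_from_mask_py t m → Pre_spans_from_mask_py t m → Spec_spans_from_mask_py t m (spans_from_mask_py t m)

-- ===== LEMMAS AND PROOFS =====

def finishA (t : List Int) (r : Bool × Int × List (Int × Int)) : List (Int × Int) :=
  if r.1 then r.2.2 ++ [(r.2.1, t.getLastD 0)] else r.2.2

theorem aLoop_skip_true (t : List Int) (k : Nat) :
    ∀ rest i start spans,
      aLoop t (List.replicate k true ++ rest) i true start spans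
        = aLoop t rest (i + k) true start spans := by
  induction k with
  | zero => intro rest i start spans; simp [aLoop]
  | succ n ih =>
    intro rest i start spans
    simp only [List.replicate_succ, List.cons_append, aLoop]
    simp
    rw [ih]
    ring_nf

theorem dropWhile_eq_drop_len {α : Type} (p : α → Bool) (l : List α) :
    l.dropWhile p = l.drop (l.takeWhile p).length := by
  induction l with
  | nil => simp
  | cons a l ih =>
    by_cases h : p a = true
    · simp [List.dropWhile, List.takeWhile, h, ih]
    · simp [List.dropWhile, List.takeWhile, h]

theorem takeWhile_id_eq_replicate (l : List Bool) :
    l.takeWhile (fun b => b) = List.replicate (l.takeWhile (fun b => b)).length true := by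
  induction l with
  | nil => simp
  | cons a l ih =>
    cases a with
    | false => simp [List.takeWhile]
    | true => simpa [List.takeWhile, List.replicate_succ] using ih

theorem main_lemma (t : List Int) (i : Nat) (m : List Bool) :
    ∀ start spans,
      finishA t (aLoop t m i false start spans) = spans ++ spansGo t i m := by
  induction i, m using spansGo.induct with
  | case1 i => intro start spans; simp [aLoop, finishA, spansGo]
  | case2 i rest ih =>
    intro start spans
    have hstep : aLoop t (false :: rest) i false start spans
        = aLoop t rest (i + 1) false start spans := by
      simp only [aLoop]; simp
    rw [hstep, ih start spans]
    simp [spansGo]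
  | case3 i rest k hk ih =>
    intro start spans
    have hsplit : rest = List.replicate k true ++ rest.drop k := by
      conv_lhs => rw [← List.takeWhile_append_dropWhile (p := fun b => b) (l := rest)]
      rw [takeWhile_id_eq_replicate, dropWhile_eq_drop_len]
    have hstep1 : aLoop t (true :: rest) i false start spans
        = aLoop t (List.replicate k true ++ rest.drop k) (i + 1) true (t.getD i 0) spans := by
      conv_lhs => rw [show (true :: rest : List Bool)
        = true :: (List.replicate k true ++ rest.drop k) from by rw [← hsplit]]
      simp [aLoop]
    have hdrop : ∃ r', rest.drop k = false :: r' := by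
      have hne : rest.drop k ≠ [] := by
        intro h
        have := List.length_drop (l := rest) (i := k)
        rw [h] at this; simp at this; omega
      obtain ⟨b, r', hbr⟩ := List.exists_cons_of_ne_nil hne
      refine ⟨r', ?_⟩
      have hb : b = false := by
        have hdw : rest.drop k = rest.dropWhile (fun b => b) := by
          rw [dropWhile_eq_drop_len]
        rw [hdw] at hbr
        have := List.head?_dropWhile_not (p := fun b => b) (l := rest)
        rw [hbr] at this
        simpa using this
      rw [hbr, hb]
    obtain ⟨r', hr'⟩ := hdrop
    have hih := ih (t.getD i 0) (spans ++ [(t.getD i 0, t.getD (i + 1 + k) 0)])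
    rw [hr'] at hih
    have hoff : aLoop t (false :: r') (i + 1 + k) false (t.getD i 0)
          (spans ++ [(t.getD i 0, t.getD (i + 1 + k) 0)])
        = aLoop t r' (i + 1 + k + 1) false (t.getD i 0)
          (spans ++ [(t.getD i 0, t.getD (i + 1 + k) 0)]) := by
      simp [aLoop]
    rw [hoff] at hih
    have hstep2 : aLoop t (false :: r') (i + 1 + k) true (t.getD i 0) spans
        = aLoop t r' (i + 1 + k + 1) false (t.getD i 0)
          (spans ++ [(t.getD i 0, t.getD (i + 1 + k) 0)]) := by
      simp [aLoop]
    rw [hstep1, aLoop_skip_true, hr', hstep2, hih]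
    have hgo : spansGo t i (true :: rest)
        = (t.getD i 0, t.getD (i + 1 + k) 0) :: spansGo t (i + 1 + k) (rest.drop k) := by
      simp only [spansGo]
      rw [if_pos hk]
    rw [hgo, hr']
    simp
  | case4 i rest k hk =>
    intro start spans
    have hsplit : rest = List.replicate k true ++ rest.drop k := by
      conv_lhs => rw [← List.takeWhile_append_dropWhile (p := fun b => b) (l := rest)]
      rw [takeWhile_id_eq_replicate, dropWhile_eq_drop_len]
    have hstep1 : aLoop t (true :: rest) i false start spans
        = aLoop t (List.replicate k true ++ rest.drop k) (i + 1) true (t.getD i 0) spans := by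
      conv_lhs => rw [show (true :: rest : List Bool)
        = true :: (List.replicate k true ++ rest.drop k) from by rw [← hsplit]]
      simp [aLoop]
    have hkeq : rest.drop k = [] := by
      have hle : k ≤ rest.length := (List.takeWhile_prefix (fun b => b)).length_le
      have hk' : k = rest.length := by omega
      simp [hk']
    have hgo : spansGo t i (true :: rest) = [(t.getD i 0, t.getLastD 0)] := by
      simp only [spansGo]
      rw [if_neg hk]
    rw [hstep1, aLoop_skip_true, hkeq, hgo]
    simp [aLoop, finishA]

-- ===== VERDICT (by name: the statement is the Claim_ definition above) =====
theorem spans_from_mask_py_spec : Claim_equal_spans_from_mask_py := by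
  intro t m _ _
  unfold Spec_spans_from_mask_py spans_from_mask_py spans_from_mask_py_alt
  by_cases ht : t = []
  · simp [ht]
  · have : t.length ≠ 0 := by simpa using fun h => ht (List.eq_nil_of_length_eq_zero h)
    simp only [ht, if_neg this, if_false]
    have := main_lemma t 0 m 0 []
    simpa [finishA] using this
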